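-- pv_equiv track=rewrite | github.com/Rahwbahwdawhb/Advent-of-Code | AOC-2023/Day 4/Day4.py | appendCard_memo
-- ===== SOURCE A (Python) =====
-- def appendCard_memo(cardIn,cardDict,cardReturnDict):
--     if cardIn in cardReturnDict:
--         return cardReturnDict[cardIn]
--     else:
--         cardList=cardDict[cardIn]
--         cardCollection=[]+cardList
--         for card in cardList:
--             cardCollection+=appendCard_memo(card,cardDict,cardReturnDict)
--         # cardCollection=cardCollection
--         cardReturnDict[cardIn]=cardCollection
--         return cardCollection
-- ===== SOURCE B (Python) =====
-- # B: plain recursive expansion without the memo table.  It reads cardReturnDict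
-- # but never writes to it (A mutates cardReturnDict in place; the equivalence is
-- # about the return value only).  Simpler, but may recompute shared descendants.
-- def appendCard_memo(cardIn, cardDict, cardReturnDict):
--     def collect(card):
--         if card in cardReturnDict:
--             return cardReturnDict[card]
--         children = cardDict[card]
--         return list(children) + [x for c in children for x in collect(c)]
--     return collect(cardIn)
-- ===== Notes on version B (the rewrite author's own statement) =====
-- stated objective: simpler
-- what changed: B replaces A's memoized, dict-mutating DFS by a plain recursive expansion: it returns children + concatenated recursive expansions directly, reading cardReturnDict only as pre-seeded values and never writing to it (A's memo writes are a side effect; the claim is about the return value).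
-- outside the precondition, e.g. on appendCard_memo(1, {1: [], 2: [3]}, {}): A returns [], B returns []; on appendCard_memo(1, {1: [], 2: [2]}, {}): A returns [], B returns []
import Mathlib
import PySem

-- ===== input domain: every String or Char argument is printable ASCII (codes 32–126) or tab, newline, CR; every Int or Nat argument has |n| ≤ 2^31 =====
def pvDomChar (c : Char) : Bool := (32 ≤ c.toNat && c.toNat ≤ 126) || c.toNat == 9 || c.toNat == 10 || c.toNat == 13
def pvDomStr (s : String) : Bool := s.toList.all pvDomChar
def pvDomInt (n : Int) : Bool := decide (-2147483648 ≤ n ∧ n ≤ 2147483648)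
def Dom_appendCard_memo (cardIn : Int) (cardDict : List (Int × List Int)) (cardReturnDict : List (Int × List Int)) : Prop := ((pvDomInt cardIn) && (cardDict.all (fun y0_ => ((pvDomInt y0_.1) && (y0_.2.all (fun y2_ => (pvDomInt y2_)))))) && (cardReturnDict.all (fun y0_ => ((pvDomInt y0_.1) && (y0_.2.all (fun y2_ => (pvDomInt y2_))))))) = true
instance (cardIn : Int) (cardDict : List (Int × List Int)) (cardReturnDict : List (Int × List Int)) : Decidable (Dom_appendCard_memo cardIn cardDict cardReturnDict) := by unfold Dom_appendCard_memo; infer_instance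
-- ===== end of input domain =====

-- B drops A's memo and expands recursively; A also mutates cardReturnDict in place, B does not —
-- the equivalence proved here is about the RETURN value only.

-- ===== PORT A =====
-- A's recursion, with a fuel guard that only makes the same computation total:
-- under Pre_ (acyclic, closed) the recursion depth is at most the number of unmemoized
-- cardDict keys + 1 ≤ cardDict.length + 1, which is the fuel appendCard_memo supplies.
def goA (d : PySem.Dict Int (List Int)) : Nat → Int → PySem.Dict Int (List Int) → Option (List Int × PySem.Dict Int (List Int))
  | 0, _, _ => none
  | f+1, x, m =>
    match PySem.Dict.get? m x with
    | some v => some (v, m)                     -- if cardIn in cardReturnDict: return cardReturnDict[cardIn]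
    | none =>
      match PySem.Dict.get? d x with
      | none => none                            -- cardDict[cardIn] raises KeyError
      | some cardList =>
        -- cardCollection = [] + cardList; for card in cardList: cardCollection += appendCard_memo(card, ...)
        match cardList.foldl
            (fun st c => st.bind (fun p => (goA d f c p.2).map (fun q => (p.1 ++ q.1, q.2))))
            (some (cardList, m)) with
        | none => none
        | some p => some (p.1, p.2.insert x p.1)  -- cardReturnDict[cardIn] = cardCollection; return it

def appendCard_memo (cardIn : Int) (cardDict : List (Int × List Int)) (cardReturnDict : List (Int × List Int)) : List Int :=
  match goA (PySem.Dict.mk cardDict) (cardDict.length + 1) cardIn (PySem.Dict.mk cardReturnDict) with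
  | some p => p.1
  | none => []

-- ===== PORT B =====
-- Source B's collect: memo-free recursion; '[x for c in children for x in collect(c)]'
-- is ported as mapM then flatten; the same fuel guard makes it total.
def goB (d m0 : PySem.Dict Int (List Int)) : Nat → Int → Option (List Int)
  | 0, _ => none
  | f+1, x =>
    match PySem.Dict.get? m0 x with
    | some v => some v
    | none =>
      match PySem.Dict.get? d x with
      | none => none
      | some ch => (ch.mapM (goB d m0 f)).map (fun rs => ch ++ rs.flatten)

def appendCard_memo_alt (cardIn : Int) (cardDict : List (Int × List Int)) (cardReturnDict : List (Int × List Int)) : List Int :=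
  (goB (PySem.Dict.mk cardDict) (PySem.Dict.mk cardReturnDict) (cardDict.length + 1) cardIn).getD []

-- ===== PRECONDITION & SPEC =====
-- helpers for Pre_: the unmemoized cardDict keys and one peeling step of the
-- "some child is unmemoized and still remaining" filter (a standard acyclicity test)
def pvUnmemo (m0 : PySem.Dict Int (List Int)) (x : Int) : Bool := (PySem.Dict.get? m0 x).isNone
def pvU (d m0 : PySem.Dict Int (List Int)) : List Int := (PySem.Dict.keys d).filter (pvUnmemo m0)
def pvStep (d m0 : PySem.Dict Int (List Int)) (R : List Int) : List Int :=
  R.filter (fun k => ((PySem.Dict.get? d k).getD []).any (fun c => pvUnmemo m0 c && R.contains c))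
def pvRem (d m0 : PySem.Dict Int (List Int)) (n : Nat) : List Int := (pvStep d m0)^[n] (pvU d m0)
def pvClosure (d m0 : PySem.Dict Int (List Int)) : Prop :=
  ∀ p ∈ d.items, pvUnmemo m0 p.1 = true →
    ∀ v ∈ p.2, (PySem.Dict.get? m0 v).isSome = true ∨ (PySem.Dict.get? d v).isSome = true

-- Pre_ excludes exactly the inputs where A's recursion raises (a reachable unmemoized card
-- missing from cardDict: KeyError; a cycle among unmemoized cards: RecursionError); for
-- simplicity the missing-child and acyclicity conditions are stated over ALL unmemoized
-- cardDict entries rather than only the reachable ones, so some inputs whose bad entries are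
-- unreachable are also excluded (A returns there, and B returns the same value — see cites).
def Pre_appendCard_memo (cardIn : Int) (cardDict : List (Int × List Int)) (cardReturnDict : List (Int × List Int)) : Prop :=
  (PySem.Dict.get? (PySem.Dict.mk cardReturnDict) cardIn).isSome = true ∨
  ((PySem.Dict.get? (PySem.Dict.mk cardDict) cardIn).isSome = true ∧
   pvClosure (PySem.Dict.mk cardDict) (PySem.Dict.mk cardReturnDict) ∧
   pvRem (PySem.Dict.mk cardDict) (PySem.Dict.mk cardReturnDict)
     (pvU (PySem.Dict.mk cardDict) (PySem.Dict.mk cardReturnDict)).length = [])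

instance (cardIn : Int) (cardDict : List (Int × List Int)) (cardReturnDict : List (Int × List Int)) : Decidable (Pre_appendCard_memo cardIn cardDict cardReturnDict) := by
  unfold Pre_appendCard_memo pvClosure; infer_instance

def pvWitness_appendCard_memo : Int × (List (Int × List Int)) × (List (Int × List Int)) :=
  (1, [(1, [2]), (2, [])], [])

def Spec_appendCard_memo (cardIn : Int) (cardDict : List (Int × List Int)) (cardReturnDict : List (Int × List Int)) (out : List Int) : Prop := out = appendCard_memo_alt cardIn cardDict cardReturnDict
instance (cardIn : Int) (cardDict : List (Int × List Int)) (cardReturnDict : List (Int × List Int)) (out : List Int) : Decidable (Spec_appendCard_memo cardIn cardDict cardReturnDict out) := by unfold Spec_appendCard_memo; infer_instance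

-- ===== CLAIM (what is proved, stated in full; the proofs are below) =====
def Claim_equal_appendCard_memo : Prop := ∀ (cardIn : Int) (cardDict : List (Int × List Int)) (cardReturnDict : List (Int × List Int)), Dom_appendCard_memo cardIn cardDict cardReturnDict → Pre_appendCard_memo cardIn cardDict cardReturnDict → Spec_appendCard_memo cardIn cardDict cardReturnDict (appendCard_memo cardIn cardDict cardReturnDict)

-- ===== LEMMAS AND PROOFS =====

-- the memo invariant A maintains: it extends the initial memo m0, and every entry agrees
-- with B's memo-free expansion
def pvCoh (d m0 m : PySem.Dict Int (List Int)) : Prop :=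
  (∀ k v, PySem.Dict.get? m0 k = some v → PySem.Dict.get? m k = some v) ∧
  (∀ k v, PySem.Dict.get? m k = some v → goB d m0 (d.size + 1) k = some v)

lemma pvRem_succ (d m0 : PySem.Dict Int (List Int)) (n : Nat) :
    pvRem d m0 (n+1) = pvStep d m0 (pvRem d m0 n) := by
  simp [pvRem, Function.iterate_succ_apply']

lemma goB_memo (d m0 : PySem.Dict Int (List Int)) (x : Int) (v : List Int)
    (h : PySem.Dict.get? m0 x = some v) (f : Nat) (hf : 0 < f) :
    goB d m0 f x = some v := by
  cases f with
  | zero => omega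
  | succ f => simp [goB, h]

-- mapM over Option respects pointwise-equal functions (no library lemma found by exact?)
lemma pvMapM_congr (f g : Int → Option (List Int)) (l : List Int) (h : ∀ c ∈ l, f c = g c) :
    l.mapM f = l.mapM g := by
  induction l with
  | nil => rfl
  | cons c cs ih =>
    simp only [List.mapM_cons, h c (by simp), ih (fun c hc => h c (by simp [hc]))]

lemma pvRem_subset_U (d m0 : PySem.Dict Int (List Int)) : ∀ n, pvRem d m0 n ⊆ pvU d m0 := by
  intro n
  induction n with
  | zero => exact fun x hx => hx
  | succ n ih => rw [pvRem_succ]; exact fun x hx => ih (List.mem_of_mem_filter hx)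

lemma pvMem_U (d m0 : PySem.Dict Int (List Int)) (x : Int) :
    x ∈ pvU d m0 ↔ x ∈ d.keys ∧ pvUnmemo m0 x = true := List.mem_filter

lemma pvChildren_ok (d m0 : PySem.Dict Int (List Int)) (hcl : pvClosure d m0)
    (x : Int) (ch : List Int) (n : Nat)
    (hout : x ∉ pvRem d m0 (n+1)) (hin : x ∈ pvRem d m0 n)
    (hch : PySem.Dict.get? d x = some ch) :
    ∀ c ∈ ch, (PySem.Dict.get? m0 c).isSome = true ∨ (c ∈ pvU d m0 ∧ c ∉ pvRem d m0 n) := by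
  intro c hc
  rw [pvRem_succ, pvStep] at hout
  have hpred : ¬ ((((PySem.Dict.get? d x).getD []).any
      (fun c => pvUnmemo m0 c && (pvRem d m0 n).contains c)) = true) := by
    intro hp
    exact hout (List.mem_filter.mpr ⟨hin, hp⟩)
  rw [hch] at hpred
  simp only [Option.getD_some, List.any_eq_true, not_exists, not_and] at hpred
  have hnc := hpred c hc
  by_cases hm : (PySem.Dict.get? m0 c).isSome = true
  · exact Or.inl hm
  · right
    have hun : pvUnmemo m0 c = true := by
      cases hq : PySem.Dict.get? m0 c with
      | none => simp [pvUnmemo, hq]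
      | some w => exact absurd (by simp [hq]) hm
    have hxU : x ∈ pvU d m0 := pvRem_subset_U d m0 n hin
    have hdk : (PySem.Dict.get? d c).isSome = true := by
      rcases hcl (x, ch) (PySem.Dict.mem_items_of_get?_eq_some d hch)
          ((pvMem_U d m0 x).mp hxU).2 c hc with h | h
      · exact absurd h hm
      · exact h
    constructor
    · refine (pvMem_U d m0 c).mpr ⟨?_, hun⟩
      by_contra hk
      rw [← PySem.Dict.get?_eq_none_iff_not_mem_keys] at hk
      simp [hk] at hdk
    · intro hcr
      simp [hun] at hnc
      exact hnc hcr

lemma goB_stable (d m0 : PySem.Dict Int (List Int)) (hcl : pvClosure d m0) :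
    ∀ n, ∀ x, x ∈ pvU d m0 → x ∉ pvRem d m0 n →
    ∀ f g, n < f → n < g → goB d m0 f x = goB d m0 g x := by
  intro n
  induction n using Nat.strong_induction_on with
  | _ n ih =>
    intro x hxU hxR f g hf hg
    obtain ⟨f', rfl⟩ : ∃ f', f = f' + 1 := ⟨f - 1, by omega⟩
    obtain ⟨g', rfl⟩ : ∃ g', g = g' + 1 := ⟨g - 1, by omega⟩
    have hun : pvUnmemo m0 x = true := ((pvMem_U d m0 x).mp hxU).2
    have hm0 : PySem.Dict.get? m0 x = none := by
      simpa [pvUnmemo, Option.isNone_iff_eq_none] using hun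
    have hdx : (PySem.Dict.get? d x).isSome = true := by
      have hk := ((pvMem_U d m0 x).mp hxU).1
      cases hq : PySem.Dict.get? d x with
      | none => exact absurd ((PySem.Dict.get?_eq_none_iff_not_mem_keys d x).mp hq) (by simpa using hk)
      | some w => simp
    obtain ⟨ch, hch⟩ := Option.isSome_iff_exists.mp hdx
    cases n with
    | zero => simp [pvRem] at hxR; exact absurd hxU hxR
    | succ n' =>
      by_cases hin : x ∈ pvRem d m0 n'
      · have hok := pvChildren_ok d m0 hcl x ch n' hxR hin hch
        have hmm : ch.mapM (goB d m0 f') = ch.mapM (goB d m0 g') := by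
          apply pvMapM_congr
          intro c hc
          rcases hok c hc with hms | ⟨hcU, hcR⟩
          · obtain ⟨v, hv⟩ := Option.isSome_iff_exists.mp hms
            rw [goB_memo d m0 c v hv f' (by omega), goB_memo d m0 c v hv g' (by omega)]
          · exact ih n' (by omega) c hcU hcR f' g' (by omega) (by omega)
        simp [goB, hm0, hch, hmm]
      · exact ih n' (by omega) x hxU hin (f' + 1) (g' + 1) (by omega) (by omega)

lemma goA_main (d m0 : PySem.Dict Int (List Int)) (hcl : pvClosure d m0) :
    ∀ n, n ≤ d.size → ∀ x m, pvCoh d m0 m →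
    ((PySem.Dict.get? m x).isSome = true ∨ (x ∈ pvU d m0 ∧ x ∉ pvRem d m0 n)) →
    ∀ f, n < f →
    ∃ v m', goA d f x m = some (v, m') ∧ goB d m0 (d.size + 1) x = some v ∧ pvCoh d m0 m' := by
  intro n
  induction n using Nat.strong_induction_on with
  | _ n ih =>
    intro hnsz x m hcoh hok f hf
    obtain ⟨f', rfl⟩ : ∃ f', f = f' + 1 := ⟨f - 1, by omega⟩
    cases hm : PySem.Dict.get? m x with
    | some v => exact ⟨v, m, by simp [goA, hm], hcoh.2 x v hm, hcoh⟩
    | none =>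
      obtain ⟨hxU, hxR⟩ : x ∈ pvU d m0 ∧ x ∉ pvRem d m0 n := by
        rcases hok with hs | h
        · rw [hm] at hs; simp at hs
        · exact h
      have hun : pvUnmemo m0 x = true := ((pvMem_U d m0 x).mp hxU).2
      have hm0 : PySem.Dict.get? m0 x = none := by
        simpa [pvUnmemo, Option.isNone_iff_eq_none] using hun
      have hdx : (PySem.Dict.get? d x).isSome = true := by
        have hk := ((pvMem_U d m0 x).mp hxU).1
        cases hq : PySem.Dict.get? d x with
        | none => exact absurd ((PySem.Dict.get?_eq_none_iff_not_mem_keys d x).mp hq) (by simpa using hk)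
        | some w => simp
      obtain ⟨ch, hch⟩ := Option.isSome_iff_exists.mp hdx
      cases n with
      | zero => simp [pvRem] at hxR; exact absurd hxU hxR
      | succ n' =>
        by_cases hin : x ∈ pvRem d m0 n'
        · have hokc := pvChildren_ok d m0 hcl x ch n' hxR hin hch
          -- the for-loop over the children, as a fold invariant
          have hfold : ∀ (l : List Int),
              (∀ c ∈ l, (PySem.Dict.get? m0 c).isSome = true ∨ (c ∈ pvU d m0 ∧ c ∉ pvRem d m0 n')) →
              ∀ (m₁ : PySem.Dict Int (List Int)) (acc : List Int), pvCoh d m0 m₁ →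
              ∃ rs m',
                (l.foldl (fun st c => st.bind
                    (fun p => (goA d f' c p.2).map (fun q => (p.1 ++ q.1, q.2)))) (some (acc, m₁)))
                  = some (acc ++ rs.flatten, m') ∧
                l.mapM (goB d m0 (d.size + 1)) = some rs ∧ pvCoh d m0 m' := by
            intro l
            induction l with
            | nil => intro _ m₁ acc hc1; exact ⟨[], m₁, by simp, by simp, hc1⟩
            | cons c cs ihl =>
              intro hl m₁ acc hc1
              have hokm : (PySem.Dict.get? m₁ c).isSome = true ∨ (c ∈ pvU d m0 ∧ c ∉ pvRem d m0 n') := by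
                rcases hl c (by simp) with hms | h
                · obtain ⟨w, hw⟩ := Option.isSome_iff_exists.mp hms
                  exact Or.inl (by simp [hc1.1 c w hw])
                · exact Or.inr h
              obtain ⟨v, m₂, hgo, hgB, hc2⟩ :=
                ih n' (by omega) (by omega) c m₁ hc1 hokm f' (by omega)
              obtain ⟨rs, m', hfo, hmm, hc3⟩ :=
                ihl (fun c hc => hl c (by simp [hc])) m₂ (acc ++ v) hc2
              refine ⟨v :: rs, m', ?_, ?_, hc3⟩
              · simp only [List.foldl_cons, Option.bind_some, hgo, Option.map_some]
                rw [hfo]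
                simp [List.append_assoc]
              · simp [List.mapM_cons, hgB, hmm]
          obtain ⟨rs, m', hfo, hmm, hc'⟩ := hfold ch hokc m ch hcoh
          have hAres : goA d (f' + 1) x m
              = some (ch ++ rs.flatten, m'.insert x (ch ++ rs.flatten)) := by
            simp only [goA, hm, hch]
            rw [hfo]
          have hmm' : ch.mapM (goB d m0 d.size) = some rs := by
            rw [← hmm]
            apply pvMapM_congr
            intro c hc
            rcases hokc c hc with hms | ⟨hcU, hcR⟩
            · obtain ⟨w, hw⟩ := Option.isSome_iff_exists.mp hms
              rw [goB_memo d m0 c w hw d.size (by omega), goB_memo d m0 c w hw (d.size + 1) (by omega)]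
            · exact goB_stable d m0 hcl n' c hcU hcR d.size (d.size + 1) (by omega) (by omega)
          have hBres : goB d m0 (d.size + 1) x = some (ch ++ rs.flatten) := by
            simp [goB, hm0, hch, hmm']
          refine ⟨ch ++ rs.flatten, m'.insert x (ch ++ rs.flatten), hAres, hBres, ?_, ?_⟩
          · intro k v hk
            have hkx : k ≠ x := by
              intro h; subst h; rw [hm0] at hk; cases hk
            rw [PySem.Dict.get?_insert]
            simp only [hkx, if_false]
            exact hc'.1 k v hk
          · intro k w hk
            rw [PySem.Dict.get?_insert] at hk
            by_cases hkx : k = x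
            · subst hkx
              rw [if_pos rfl] at hk
              injection hk with hk
              rw [← hk]; exact hBres
            · simp only [hkx, if_false] at hk
              exact hc'.2 k w hk
        · exact ih n' (by omega) (by omega) x m hcoh (Or.inr ⟨hxU, hin⟩) (f' + 1) (by omega)

-- ===== VERDICT (by name: the statement is the Claim_ definition above) =====
theorem appendCard_memo_spec : Claim_equal_appendCard_memo := by
  intro cardIn cd crd _ hpre
  unfold Spec_appendCard_memo appendCard_memo appendCard_memo_alt
  by_cases hms : (PySem.Dict.get? (PySem.Dict.mk crd) cardIn).isSome = true
  · obtain ⟨v, hv⟩ := Option.isSome_iff_exists.mp hms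
    rw [goB_memo (PySem.Dict.mk cd) (PySem.Dict.mk crd) cardIn v hv (cd.length + 1) (by omega)]
    simp [goA, hv]
  · rcases hpre with hs | ⟨hcardin, hcl, hrem⟩
    · exact absurd hs hms
    · have hun : pvUnmemo (PySem.Dict.mk crd) cardIn = true := by
        cases hq : PySem.Dict.get? (PySem.Dict.mk crd) cardIn with
        | none => simp [pvUnmemo, hq]
        | some w => exact absurd (by simp [hq]) hms
      have hxU : cardIn ∈ pvU (PySem.Dict.mk cd) (PySem.Dict.mk crd) := by
        refine (pvMem_U _ _ _).mpr ⟨?_, hun⟩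
        by_contra hk
        rw [← PySem.Dict.get?_eq_none_iff_not_mem_keys] at hk
        simp [hk] at hcardin
      have hxR : cardIn ∉ pvRem (PySem.Dict.mk cd) (PySem.Dict.mk crd)
          (pvU (PySem.Dict.mk cd) (PySem.Dict.mk crd)).length := by
        rw [hrem]; exact List.not_mem_nil
      have hnsz : (pvU (PySem.Dict.mk cd) (PySem.Dict.mk crd)).length ≤ (PySem.Dict.mk cd).size := by
        have h1 := List.length_filter_le (pvUnmemo (PySem.Dict.mk crd)) (PySem.Dict.keys (PySem.Dict.mk cd))
        have h2 : (PySem.Dict.keys (PySem.Dict.mk cd)).length = (PySem.Dict.mk cd).size := by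
          simp [PySem.Dict.keys, PySem.Dict.size]
        rw [pvU]; omega
      have hcoh0 : pvCoh (PySem.Dict.mk cd) (PySem.Dict.mk crd) (PySem.Dict.mk crd) :=
        ⟨fun _ _ h => h, fun k v h => goB_memo _ _ k v h _ (by omega)⟩
      obtain ⟨v, m', hA, hB, _⟩ := goA_main (PySem.Dict.mk cd) (PySem.Dict.mk crd) hcl
        (pvU (PySem.Dict.mk cd) (PySem.Dict.mk crd)).length hnsz cardIn (PySem.Dict.mk crd) hcoh0
        (Or.inr ⟨hxU, hxR⟩) (cd.length + 1)
        (by have : (PySem.Dict.mk cd).size = cd.length := rfl; omega)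
      have hB' : goB (PySem.Dict.mk cd) (PySem.Dict.mk crd) (cd.length + 1) cardIn = some v := hB
      rw [hA, hB']
      rfl
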